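-- pv_equiv track=rewrite | github.com/LR-bio/CRISPR-Target-Predictor | # utils/finder.py | is_valid_pam
-- ===== SOURCE A (Python) =====
-- def is_valid_pam(pam_seq, pam_pattern):
--     """
--     Check if PAM sequence matches PAM pattern (e.g., NGG, TTTV).
--     N = any base, V = A/C/G, T = T, etc.
--     """
--     if len(pam_seq) != len(pam_pattern):
--         return False
--
--     pam_map = {
--         "N": "ACGT",
--         "V": "ACG",
--         "T": "T",
--         "G": "G",
--         "A": "A",
--         "C": "C",
--     }
--
--     for base, pattern_char in zip(pam_seq, pam_pattern):
--         if base not in pam_map.get(pattern_char, ""):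
--             return False
--     return True
-- ===== SOURCE B (Python) =====
-- import re
--
-- _CLASS = {"N": "[ACGT]", "V": "[ACG]", "T": "T", "G": "G", "A": "A", "C": "C"}
--
--
-- def is_valid_pam(pam_seq, pam_pattern):
--     """Check if PAM sequence matches PAM pattern via an anchored regex."""
--     regex = "".join(_CLASS.get(ch, r"[^\s\S]") for ch in pam_pattern)
--     return bool(re.fullmatch(regex, pam_seq))
-- ===== Notes on version B (the rewrite author's own statement) =====
-- stated objective: idiomatic
-- what changed: Replaces the explicit length check plus zip loop with a regex built from the IUPAC codes (unknown codes become a never-matching class) and a single anchored re.fullmatch, which enforces equal length and per-position membership at once.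
import Mathlib
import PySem

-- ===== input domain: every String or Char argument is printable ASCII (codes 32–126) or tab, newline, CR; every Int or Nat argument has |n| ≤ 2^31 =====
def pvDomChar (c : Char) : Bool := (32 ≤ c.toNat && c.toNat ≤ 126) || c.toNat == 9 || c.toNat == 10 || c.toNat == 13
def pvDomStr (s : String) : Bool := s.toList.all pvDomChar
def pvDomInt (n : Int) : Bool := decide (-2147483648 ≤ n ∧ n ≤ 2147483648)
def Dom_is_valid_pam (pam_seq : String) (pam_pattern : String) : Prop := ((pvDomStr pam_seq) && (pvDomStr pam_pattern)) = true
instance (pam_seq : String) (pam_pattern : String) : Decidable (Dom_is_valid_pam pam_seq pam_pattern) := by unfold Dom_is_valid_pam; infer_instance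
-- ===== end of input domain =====

-- B replaces A's length check + zip loop with an anchored regex (one character class
-- per IUPAC code, unknown codes a never-matching class) and a single fullmatch; more idiomatic, same cost.

-- ===== PORT A =====
-- pam_map.get(pattern_char, "") of A's constant dict literal
def pamMapGet (c : Char) : String :=
  if c = 'N' then "ACGT"
  else if c = 'V' then "ACG"
  else if c = 'T' then "T"
  else if c = 'G' then "G"
  else if c = 'A' then "A"
  else if c = 'C' then "C"
  else ""

def is_valid_pam (pam_seq : String) (pam_pattern : String) : Bool :=
  if pam_seq.toList.length ≠ pam_pattern.toList.length then false
  else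
    -- for base, pattern_char in zip(...): if base not in pam_map.get(pattern_char, ""): return False
    (pam_seq.toList.zip pam_pattern.toList).all
      (fun bp => (pamMapGet bp.2).toList.contains bp.1)

-- ===== PORT B =====
-- the regex character class _CLASS.get(ch, never-match) denotes this set of characters
def classOf (c : Char) : List Char :=
  if c = 'N' then ['A', 'C', 'G', 'T']
  else if c = 'V' then ['A', 'C', 'G']
  else if c = 'T' then ['T']
  else if c = 'G' then ['G']
  else if c = 'A' then ['A']
  else if c = 'C' then ['C']
  else []  -- [^\s\S]: matches nothing

-- re.fullmatch of a concatenation of single-character classes: both ends anchored,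
-- each position must lie in its class (exact semantics of that regex family)
def fullmatchClasses : List (List Char) → List Char → Bool
  | [], [] => true
  | cls :: rest, ch :: chs => cls.contains ch && fullmatchClasses rest chs
  | _, _ => false

def is_valid_pam_alt (pam_seq : String) (pam_pattern : String) : Bool :=
  fullmatchClasses (pam_pattern.toList.map classOf) pam_seq.toList

-- ===== PRECONDITION & SPEC =====
def Spec_is_valid_pam (pam_seq : String) (pam_pattern : String) (out : Bool) : Prop := out = is_valid_pam_alt pam_seq pam_pattern
instance (pam_seq : String) (pam_pattern : String) (out : Bool) : Decidable (Spec_is_valid_pam pam_seq pam_pattern out) := by unfold Spec_is_valid_pam; infer_instance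

-- ===== CLAIM (what is proved, stated in full; the proofs are below) =====
def Claim_equal_is_valid_pam : Prop := ∀ (pam_seq : String) (pam_pattern : String), Dom_is_valid_pam pam_seq pam_pattern → Spec_is_valid_pam pam_seq pam_pattern (is_valid_pam pam_seq pam_pattern)

-- ===== LEMMAS AND PROOFS =====

-- the string A looks membership up in and B's character class agree for every code
theorem classOf_eq_pamMapGet (c : Char) : classOf c = (pamMapGet c).toList := by
  unfold classOf pamMapGet
  split_ifs <;> decide

-- the zip-loop formulation equals the anchored class matcher, for any two char lists
theorem loop_eq_fullmatch (p s : List Char) :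
    fullmatchClasses (p.map classOf) s =
      if s.length ≠ p.length then false
      else (s.zip p).all (fun bp => (pamMapGet bp.2).toList.contains bp.1) := by
  induction p generalizing s with
  | nil =>
    cases s <;> simp [fullmatchClasses]
  | cons c p ih =>
    cases s with
    | nil => simp [fullmatchClasses]
    | cons ch s =>
      simp only [List.map, fullmatchClasses, List.zip_cons_cons, List.all_cons, ih,
        List.length_cons, classOf_eq_pamMapGet]
      by_cases h : s.length = p.length
      · simp [h]
      · simp [h]

-- ===== VERDICT (by name: the statement is the Claim_ definition above) =====
theorem is_valid_pam_spec : Claim_equal_is_valid_pam := by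
  intro pam_seq pam_pattern _
  unfold Spec_is_valid_pam is_valid_pam is_valid_pam_alt
  rw [loop_eq_fullmatch]
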